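-- pv_equiv track=rewrite | github.com/burapol01/Bitkub_Bot | ui/streamlit/pages.py | _group_strategy_decision_queue
-- ===== SOURCE A (Python) =====
-- from typing import Any, MutableMapping
--
-- def _group_strategy_decision_queue(
--     rows: list[dict[str, Any]],
-- ) -> dict[str, list[dict[str, Any]]]:
--     groups: dict[str, list[dict[str, Any]]] = {
--         "Sync first": [],
--         "Promote": [],
--         "Prune candidate": [],
--         "Keep": [],
--     }
--     for row in rows:
--         action = str(row.get("recommended_action") or "")
--         if action in groups:
--             groups[action].append(row)
--     return groups
-- ===== SOURCE B (Python) =====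
-- from typing import Any
--
-- _ACTIONS = ("Sync first", "Promote", "Prune candidate", "Keep")
--
-- def _group_strategy_decision_queue(
--     rows: list[dict[str, Any]],
-- ) -> dict[str, list[dict[str, Any]]]:
--     return {
--         action: [
--             row
--             for row in rows
--             if str(row.get("recommended_action") or "") == action
--         ]
--         for action in _ACTIONS
--     }
-- ===== Notes on version B (the rewrite author's own statement) =====
-- stated objective: simpler
-- what changed: Replaces the single mutating dispatch loop over rows (membership test + in-place append into a pre-built dict) with a dict comprehension over the four fixed action keys, each bucket being an independent filtering pass over rows.
import Mathlib
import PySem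

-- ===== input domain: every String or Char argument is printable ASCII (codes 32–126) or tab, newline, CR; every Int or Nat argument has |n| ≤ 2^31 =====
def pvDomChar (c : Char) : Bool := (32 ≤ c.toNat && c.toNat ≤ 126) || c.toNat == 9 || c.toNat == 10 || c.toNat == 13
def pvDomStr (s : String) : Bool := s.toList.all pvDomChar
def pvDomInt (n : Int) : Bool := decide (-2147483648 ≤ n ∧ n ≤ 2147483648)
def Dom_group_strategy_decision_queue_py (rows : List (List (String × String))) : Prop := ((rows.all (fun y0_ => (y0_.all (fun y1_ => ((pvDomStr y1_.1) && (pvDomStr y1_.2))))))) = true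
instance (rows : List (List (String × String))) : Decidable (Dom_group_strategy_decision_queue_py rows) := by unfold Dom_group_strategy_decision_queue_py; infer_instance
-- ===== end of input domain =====

-- B replaces the single dispatching loop over rows with one independent filtering pass
-- per fixed action key (objective: simpler decomposition; same cost).

-- ===== PORT A =====
-- str(row.get("recommended_action") or ""): the value is a string, so `or ""` maps a
-- missing key (and the falsy "") to "" — exactly getD with default "".
def pvAction (row : List (String × String)) : String :=
  (PySem.Dict.mk row).getD "recommended_action" ""

def group_strategy_decision_queue_py (rows : List (List (String × String))) : List (String × List (List (String × String))) :=
  let init : PySem.Dict String (List (List (String × String))) :=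
    PySem.Dict.mk [("Sync first", []), ("Promote", []), ("Prune candidate", []), ("Keep", [])]
  let groups := rows.foldl (fun groups row =>
    let action := pvAction row
    if groups.contains action then groups.modify action [] (fun xs => xs ++ [row]) else groups) init
  groups.items

-- ===== PORT B =====
def group_strategy_decision_queue_py_alt (rows : List (List (String × String))) : List (String × List (List (String × String))) :=
  ["Sync first", "Promote", "Prune candidate", "Keep"].map
    (fun action => (action, rows.filter (fun row => pvAction row == action)))

-- ===== PRECONDITION & SPEC =====
def Spec_group_strategy_decision_queue_py (rows : List (List (String × String))) (out : List (String × List (List (String × String)))) : Prop := out = group_strategy_decision_queue_py_alt rows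
instance (rows : List (List (String × String))) (out : List (String × List (List (String × String)))) : Decidable (Spec_group_strategy_decision_queue_py rows out) := by unfold Spec_group_strategy_decision_queue_py; infer_instance

-- ===== CLAIM (what is proved, stated in full; the proofs are below) =====
def Claim_equal_group_strategy_decision_queue_py : Prop := ∀ (rows : List (List (String × String))), Dom_group_strategy_decision_queue_py rows → Spec_group_strategy_decision_queue_py rows (group_strategy_decision_queue_py rows)

-- ===== LEMMAS AND PROOFS =====

-- Evaluating one dispatch step of A's loop on the (fixed-key) four-bucket dict.
theorem pvStep1 {ν : Type} (v1 v2 v3 v4 : List ν) (w : ν) :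
    ((PySem.Dict.mk [("Sync first", v1), ("Promote", v2), ("Prune candidate", v3), ("Keep", v4)]).modify "Sync first" [] (fun xs => xs ++ [w]))
    = PySem.Dict.mk [("Sync first", v1 ++ [w]), ("Promote", v2), ("Prune candidate", v3), ("Keep", v4)] := by
  apply PySem.Dict.ext
  simp [PySem.Dict.modify, PySem.Dict.insert, PySem.Dict.getD, PySem.Dict.get?, PySem.Dict.contains]

theorem pvStep2 {ν : Type} (v1 v2 v3 v4 : List ν) (w : ν) :
    ((PySem.Dict.mk [("Sync first", v1), ("Promote", v2), ("Prune candidate", v3), ("Keep", v4)]).modify "Promote" [] (fun xs => xs ++ [w]))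
    = PySem.Dict.mk [("Sync first", v1), ("Promote", v2 ++ [w]), ("Prune candidate", v3), ("Keep", v4)] := by
  apply PySem.Dict.ext
  simp [PySem.Dict.modify, PySem.Dict.insert, PySem.Dict.getD, PySem.Dict.get?, PySem.Dict.contains]

theorem pvStep3 {ν : Type} (v1 v2 v3 v4 : List ν) (w : ν) :
    ((PySem.Dict.mk [("Sync first", v1), ("Promote", v2), ("Prune candidate", v3), ("Keep", v4)]).modify "Prune candidate" [] (fun xs => xs ++ [w]))
    = PySem.Dict.mk [("Sync first", v1), ("Promote", v2), ("Prune candidate", v3 ++ [w]), ("Keep", v4)] := by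
  apply PySem.Dict.ext
  simp [PySem.Dict.modify, PySem.Dict.insert, PySem.Dict.getD, PySem.Dict.get?, PySem.Dict.contains]

theorem pvStep4 {ν : Type} (v1 v2 v3 v4 : List ν) (w : ν) :
    ((PySem.Dict.mk [("Sync first", v1), ("Promote", v2), ("Prune candidate", v3), ("Keep", v4)]).modify "Keep" [] (fun xs => xs ++ [w]))
    = PySem.Dict.mk [("Sync first", v1), ("Promote", v2), ("Prune candidate", v3), ("Keep", v4 ++ [w])] := by
  apply PySem.Dict.ext
  simp [PySem.Dict.modify, PySem.Dict.insert, PySem.Dict.getD, PySem.Dict.get?, PySem.Dict.contains]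

-- Loop invariant: folding A's dispatch step over `rows`, starting from the four-key
-- dict with current bucket contents v1…v4, appends to each bucket exactly the rows
-- whose action equals that bucket's key.
theorem pvLoop_items (rows : List (List (String × String)))
    (v1 v2 v3 v4 : List (List (String × String))) :
    (rows.foldl (fun groups row =>
        let action := pvAction row
        if groups.contains action then groups.modify action [] (fun xs => xs ++ [row]) else groups)
      (PySem.Dict.mk [("Sync first", v1), ("Promote", v2), ("Prune candidate", v3), ("Keep", v4)])).items
    = [("Sync first", v1 ++ rows.filter (fun row => pvAction row == "Sync first")),
       ("Promote", v2 ++ rows.filter (fun row => pvAction row == "Promote")),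
       ("Prune candidate", v3 ++ rows.filter (fun row => pvAction row == "Prune candidate")),
       ("Keep", v4 ++ rows.filter (fun row => pvAction row == "Keep"))] := by
  induction rows generalizing v1 v2 v3 v4 with
  | nil => simp
  | cons row rest ih =>
    simp only [List.foldl_cons, List.filter_cons]
    by_cases h1 : pvAction row = "Sync first"
    · rw [h1]
      rw [show (PySem.Dict.mk [("Sync first", v1), ("Promote", v2), ("Prune candidate", v3), ("Keep", v4)]).contains "Sync first" = true by
            simp [PySem.Dict.contains]]
      rw [if_pos rfl, pvStep1, ih]
      simp
    · by_cases h2 : pvAction row = "Promote"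
      · rw [h2]
        rw [show (PySem.Dict.mk [("Sync first", v1), ("Promote", v2), ("Prune candidate", v3), ("Keep", v4)]).contains "Promote" = true by
              simp [PySem.Dict.contains]]
        rw [if_pos rfl, pvStep2, ih]
        simp
      · by_cases h3 : pvAction row = "Prune candidate"
        · rw [h3]
          rw [show (PySem.Dict.mk [("Sync first", v1), ("Promote", v2), ("Prune candidate", v3), ("Keep", v4)]).contains "Prune candidate" = true by
                simp [PySem.Dict.contains]]
          rw [if_pos rfl, pvStep3, ih]
          simp
        · by_cases h4 : pvAction row = "Keep"
          · rw [h4]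
            rw [show (PySem.Dict.mk [("Sync first", v1), ("Promote", v2), ("Prune candidate", v3), ("Keep", v4)]).contains "Keep" = true by
                  simp [PySem.Dict.contains]]
            rw [if_pos rfl, pvStep4, ih]
            simp
          · have hc : (PySem.Dict.mk [("Sync first", v1), ("Promote", v2), ("Prune candidate", v3), ("Keep", v4)]).contains (pvAction row) = false := by
              simp [PySem.Dict.contains, Ne.symm h1, Ne.symm h2, Ne.symm h3, Ne.symm h4]
            rw [hc, if_neg (by simp), ih]
            simp [h1, h2, h3, h4]

-- ===== VERDICT (by name: the statement is the Claim_ definition above) =====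
theorem group_strategy_decision_queue_py_spec : Claim_equal_group_strategy_decision_queue_py := by
  intro rows _
  unfold Spec_group_strategy_decision_queue_py group_strategy_decision_queue_py group_strategy_decision_queue_py_alt
  simpa using pvLoop_items rows [] [] [] []
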